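-- pv_equiv track=rewrite | github.com/aschau/aschau.github.io | games/parsed/generate.py | _count_min_swaps
-- ===== SOURCE A (Python) =====
-- def _count_min_swaps(scrambled, target):
--     """Minimum swaps from scrambled to target, handling duplicate tokens."""
--     n = len(scrambled)
--     if n != len(target):
--         return n
--     used = [False] * n
--     perm = [0] * n
--     for i in range(n):
--         best = -1
--         for j in range(n):
--             if not used[j] and scrambled[j] == target[i]:
--                 if j == i:
--                     best = j
--                     break
--                 if best == -1:
--                     best = j
--         if best == -1:
--             return n
--         used[best] = True
--         perm[i] = best
--     visited = [False] * n
--     cycles = 0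
--     for i in range(n):
--         if visited[i] or perm[i] == i:
--             if not visited[i]:
--                 cycles += 1
--                 visited[i] = True
--             continue
--         cycles += 1
--         j = i
--         while not visited[j]:
--             visited[j] = True
--             j = perm[j]
--     return n - cycles
-- ===== SOURCE B (Python) =====
-- def _positions(tokens):
--     """Map each token to the ascending list of indices where it occurs."""
--     pos = {}
--     for k, tok in enumerate(tokens):
--         pos.setdefault(tok, []).append(k)
--     return pos
--
--
-- def _count_min_swaps(scrambled, target):
--     """Minimum swaps from scrambled to target, handling duplicate tokens.
--
--     The greedy matching decomposes per token (a scrambled slot can only be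
--     claimed by target slots wanting the same token), so we group both lists
--     by token once and match each group independently: keep the diagonal
--     slot when it is still free, otherwise take the smallest free slot.
--     The swap count is then obtained by selection-style swap simulation
--     (repeatedly swap arr[i] into its home), not by counting cycles.
--     """
--     n = len(scrambled)
--     if n != len(target):
--         return n
--     spos = _positions(scrambled)
--     tpos = _positions(target)
--     perm = list(range(n))
--     for tok, tis in tpos.items():
--         avail = spos.get(tok, [])
--         for i in tis:
--             if i in avail:
--                 avail.remove(i)          # keep the diagonal: perm[i] stays i
--             elif avail:
--                 perm[i] = avail.pop(0)   # smallest remaining slot of tok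
--             else:
--                 return n                 # tok demanded more often than supplied
--     arr = perm
--     swaps = 0
--     for i in range(n):
--         while arr[i] != i:
--             j = arr[i]
--             arr[i], arr[j] = arr[j], arr[i]
--             swaps += 1
--     return swaps
-- ===== Notes on version B (the rewrite author's own statement) =====
-- stated objective: faster
-- what changed: B groups both lists by token once (two dicts) and matches each token's slot group independently of the others (the greedy decomposes per token: keep the diagonal slot when free, else take the smallest free slot), then counts the swaps by selection-style in-place swap simulation instead of A's per-index O(n) rescans followed by cycle counting.
import Mathlib
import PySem

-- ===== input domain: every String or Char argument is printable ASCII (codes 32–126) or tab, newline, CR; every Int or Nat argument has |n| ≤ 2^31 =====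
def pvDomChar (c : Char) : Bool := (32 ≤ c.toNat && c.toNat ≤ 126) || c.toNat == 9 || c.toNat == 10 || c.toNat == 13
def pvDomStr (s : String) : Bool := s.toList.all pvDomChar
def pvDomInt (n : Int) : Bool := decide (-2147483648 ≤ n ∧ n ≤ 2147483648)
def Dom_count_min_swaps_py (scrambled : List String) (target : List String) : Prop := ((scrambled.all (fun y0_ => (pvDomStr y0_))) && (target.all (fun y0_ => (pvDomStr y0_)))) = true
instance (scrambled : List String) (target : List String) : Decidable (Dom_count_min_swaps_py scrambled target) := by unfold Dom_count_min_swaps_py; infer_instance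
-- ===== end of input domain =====

-- B groups both lists by token once and matches each token's slots independently
-- (diagonal slot when still free, else the smallest free slot), then counts the
-- swaps by selection-style swap simulation instead of cycle counting.

-- ===== PORT A =====

-- inner `for j in range(n): ...` scan with `break` at j == i
def pvScanA (scr : List String) (tok : String) (used : List Bool) (i : Nat) (j : Nat) (best : Int) : Int :=
  if _h : j < scr.length then
    if used.getD j false = false ∧ scr.getD j "" = tok then
      if j = i then (j : Int)
      else pvScanA scr tok used i (j + 1) (if best = -1 then (j : Int) else best)
    else pvScanA scr tok used i (j + 1) best
  else best
termination_by scr.length - j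

-- `for i in range(n):` building perm; `none` = the early `return n`
def pvPermA (scr tgt : List String) (i : Nat) (used : List Bool) (perm : List Int) : Option (List Int) :=
  if _h : i < tgt.length then
    let best := pvScanA scr (tgt.getD i "") used i 0 (-1)
    if best = -1 then none
    else pvPermA scr tgt (i + 1) (used.set best.toNat true) (perm.set i best)
  else some perm
termination_by tgt.length - i

-- `while not visited[j]: visited[j] = True; j = perm[j]` (fuel = n bounds the walk; it
-- marks a fresh index each step, so n steps always suffice)
def pvWalk (perm : List Int) (fuel : Nat) (j : Nat) (visited : List Bool) : List Bool :=
  match fuel with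
  | 0 => visited
  | fuel + 1 =>
    if visited.getD j false = false then
      pvWalk perm fuel (perm.getD j 0).toNat (visited.set j true)
    else visited

-- second `for i in range(n):` of A, counting cycles
def pvCyclesA (perm : List Int) (i : Nat) (visited : List Bool) (cycles : Int) : Int :=
  if _h : i < perm.length then
    if visited.getD i false = true ∨ perm.getD i 0 = (i : Int) then
      if visited.getD i false = false then
        pvCyclesA perm (i + 1) (visited.set i true) (cycles + 1)
      else pvCyclesA perm (i + 1) visited cycles
    else pvCyclesA perm (i + 1) (pvWalk perm perm.length i visited) (cycles + 1)
  else cycles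
termination_by perm.length - i

def count_min_swaps_py (scrambled : List String) (target : List String) : Int :=
  let n := scrambled.length
  if n ≠ target.length then (n : Int)
  else
    match pvPermA scrambled target 0 (List.replicate n false) (List.replicate n 0) with
    | none => (n : Int)
    | some perm => (n : Int) - pvCyclesA perm 0 (List.replicate n false) 0

-- ===== PORT B =====

-- `_positions(tokens)`: dict token -> ascending list of indices
def pvGroup (l : List String) : PySem.Dict String (List Int) :=
  (PySem.List.enumerate l 0).foldl (fun d p => d.modify p.2 [] (· ++ [p.1])) PySem.Dict.empty

-- `for i in tis:` of one token: diagonal if i still in avail, else pop the head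
def pvTokRun : List Int → List Int → List Int → Option (List Int)
  | [], _, perm => some perm
  | i :: tis, avail, perm =>
    if avail.contains i then
      pvTokRun tis ((PySem.List.remove? avail i).getD avail) perm
    else
      match avail with
      | [] => none
      | b :: rest => pvTokRun tis rest (perm.set i.toNat b)

-- `for tok, tis in tpos.items():`
def pvAllTok (spos : PySem.Dict String (List Int)) : List (String × List Int) → List Int → Option (List Int)
  | [], perm => some perm
  | (tok, tis) :: items, perm =>
    match pvTokRun tis (spos.getD tok []) perm with
    | none => none
    | some perm' => pvAllTok spos items perm'

-- `while arr[i] != i: j = arr[i]; arr[i], arr[j] = arr[j], arr[i]; swaps += 1`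
-- (fuel = n bounds the loop: arr is a permutation here, so each swap fixes a fresh slot)
def pvInner (arr : List Int) (i : Nat) (fuel : Nat) (swaps : Int) : List Int × Int :=
  match fuel with
  | 0 => (arr, swaps)
  | fuel + 1 =>
    if arr.getD i 0 ≠ (i : Int) then
      let j := (arr.getD i 0).toNat
      pvInner ((arr.set i (arr.getD j 0)).set j (arr.getD i 0)) i fuel (swaps + 1)
    else (arr, swaps)

theorem pvInner_length (arr : List Int) (i : Nat) (fuel : Nat) (swaps : Int) :
    (pvInner arr i fuel swaps).1.length = arr.length := by
  induction fuel generalizing arr swaps with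
  | zero => rfl
  | succ fuel ih =>
    by_cases h : arr.getD i 0 ≠ (i : Int)
    · rw [pvInner, if_pos h, ih]; simp
    · rw [pvInner, if_neg h]

-- `for i in range(n):` of the swap simulation
def pvOuter (arr : List Int) (i : Nat) (swaps : Int) : Int :=
  if _h : i < arr.length then
    let r := pvInner arr i arr.length swaps
    pvOuter r.1 (i + 1) r.2
  else swaps
termination_by arr.length - i
decreasing_by simp only [pvInner_length]; omega

def count_min_swaps_py_alt (scrambled : List String) (target : List String) : Int :=
  let n := scrambled.length
  if n ≠ target.length then (n : Int)
  else
    match pvAllTok (pvGroup scrambled) (pvGroup target).items (PySem.List.pyRange 0 n 1) with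
    | none => (n : Int)
    | some perm => pvOuter perm 0 0

-- ===== PRECONDITION & SPEC =====
def Spec_count_min_swaps_py (scrambled : List String) (target : List String) (out : Int) : Prop := out = count_min_swaps_py_alt scrambled target
instance (scrambled : List String) (target : List String) (out : Int) : Decidable (Spec_count_min_swaps_py scrambled target out) := by unfold Spec_count_min_swaps_py; infer_instance

-- ===== CLAIM (what is proved, stated in full; the proofs are below) =====
def Claim_equal_count_min_swaps_py : Prop := ∀ (scrambled : List String) (target : List String), Dom_count_min_swaps_py scrambled target → Spec_count_min_swaps_py scrambled target (count_min_swaps_py scrambled target)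

-- ===== LEMMAS AND PROOFS =====

-- ---------- shared basics ----------

lemma pvGetD_set {α : Type} (l : List α) (k j : Nat) (a d : α) :
    (l.set k a).getD j d = if j = k ∧ k < l.length then a else l.getD j d := by
  simp only [List.getD, List.getElem?_set]
  split_ifs <;> simp_all

-- the Bool predicate "position j is an unused occurrence of tok"
def pvP (scr : List String) (used : List Bool) (tok : String) (j : Nat) : Bool :=
  !(used.getD j false) && (scr.getD j "" == tok)

-- the unused positions of tok, ascending
def pvInvList (scr : List String) (used : List Bool) (tok : String) : List Int :=
  ((List.range scr.length).filter (pvP scr used tok)).map Int.ofNat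

def pvOptToInt (o : Option Nat) : Int := match o with | some k => (k : Int) | none => -1

lemma pvP_iff (scr : List String) (used : List Bool) (tok : String) (j : Nat) :
    pvP scr used tok j = true ↔ (used.getD j false = false ∧ scr.getD j "" = tok) := by
  simp [pvP, Bool.and_eq_true, beq_iff_eq]

lemma pvRange'_cons (n j : Nat) (h : j < n) :
    List.range' j (n - j) = j :: List.range' (j + 1) (n - (j + 1)) := by
  rw [show n - j = (n - (j + 1)) + 1 by omega, List.range'_succ]

lemma pvMem_invList (scr : List String) (used : List Bool) (tok : String) (x : Nat) :
    ((x : Int) ∈ pvInvList scr used tok) ↔ (x < scr.length ∧ pvP scr used tok x = true) := by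
  unfold pvInvList
  simp [List.mem_filter, List.mem_range]

lemma pvNotMem_invList (scr : List String) (used : List Bool) (t tok : String) (k : Nat)
    (hs : scr.getD k "" = tok) (hne : t ≠ tok) : ((k : Int) ∉ pvInvList scr used t) := by
  rw [pvMem_invList]
  rintro ⟨-, hp⟩
  rw [pvP_iff] at hp
  exact hne (by rw [← hp.2, hs])

lemma pvInvList_set (scr : List String) (used : List Bool) (tok : String) (k : Nat)
    (hk : k < used.length) :
    pvInvList scr (used.set k true) tok = (pvInvList scr used tok).erase (k : Int) := by
  unfold pvInvList
  rw [show ((k : Int)) = Int.ofNat k from rfl,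
    ← List.map_erase (f := Int.ofNat) (fun a b h => Int.ofNat.inj h)]
  congr 1
  rw [List.Nodup.erase_eq_filter ((List.nodup_range).filter _), List.filter_filter]
  apply List.filter_congr
  intro j hj
  simp only [pvP, pvGetD_set]
  by_cases hjk : j = k
  · subst hjk; simp [hk]
  · simp [hjk, bne]

lemma pvInvList_nodup (scr : List String) (used : List Bool) (tok : String) :
    (pvInvList scr used tok).Nodup := by
  unfold pvInvList
  exact ((List.nodup_range).filter _).map (fun a b h => Int.ofNat.inj h)

lemma pvInvList_mem' (scr : List String) (used : List Bool) (tok : String) (x : Int)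
    (hx : x ∈ pvInvList scr used tok) :
    0 ≤ x ∧ x < (scr.length : Int) ∧ scr.getD x.toNat "" = tok := by
  unfold pvInvList at hx
  obtain ⟨k, hk, rfl⟩ := List.mem_map.mp hx
  have h1 := List.mem_filter.mp hk
  have h2 := (pvP_iff scr used tok k).mp h1.2
  have h3 := List.mem_range.mp h1.1
  refine ⟨Int.natCast_nonneg k, by simpa using (Int.ofNat_lt.mpr h3), ?_⟩
  simpa using h2.2

-- find? = head? of filter
lemma pvFind_eq_head (p : Nat → Bool) (l : List Nat) : l.find? p = (l.filter p).head? := by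
  induction l with
  | nil => rfl
  | cons a l ih =>
    cases h : p a with
    | true => simp [List.find?_cons_of_pos h, List.filter_cons_of_pos h]
    | false =>
      rw [List.find?_cons_of_neg (p := p) (by simp [h]), List.filter_cons_of_neg (p := p) (by simp [h]), ih]

-- ---------- pvScanA characterization (A's inner scan) ----------

lemma pvScanA_post (scr : List String) (tok : String) (used : List Bool) (i : Nat) :
    ∀ fuel j best, scr.length - j ≤ fuel → i < j →
      pvScanA scr tok used i j best =
        if best = -1 then pvOptToInt ((List.range' j (scr.length - j)).find? (pvP scr used tok))
        else best := by
  intro fuel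
  induction fuel with
  | zero =>
    intro j best hf _
    rw [pvScanA, dif_neg (by omega)]
    rw [show scr.length - j = 0 by omega]
    simp only [List.range'_zero, List.find?_nil, pvOptToInt]
    split_ifs with h
    · omega
    · rfl
  | succ fuel ih =>
    intro j best hf hij
    by_cases hj : j < scr.length
    · rw [pvScanA, dif_pos hj, pvRange'_cons scr.length j hj]
      by_cases hp : used.getD j false = false ∧ scr.getD j "" = tok
      · rw [if_pos hp, if_neg (show ¬ j = i by omega),
          List.find?_cons_of_pos ((pvP_iff scr used tok j).mpr hp),
          ih (j + 1) _ (by omega) (by omega)]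
        by_cases hb : best = -1
        · subst hb
          rw [if_pos rfl, if_pos rfl, if_neg (show ¬ ((j : Nat) : Int) = -1 by omega)]
          simp [pvOptToInt]
        · simp only [if_neg hb]
      · rw [if_neg hp, List.find?_cons_of_neg (by simpa [pvP_iff] using hp),
          ih (j + 1) _ (by omega) (by omega)]
    · rw [pvScanA, dif_neg hj]
      rw [show scr.length - j = 0 by omega]
      simp only [List.range'_zero, List.find?_nil, pvOptToInt]
      split_ifs with h
      · omega
      · rfl

lemma pvScanA_at_i (scr : List String) (tok : String) (used : List Bool) (i : Nat)
    (hi : i < scr.length) (best : Int) :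
    pvScanA scr tok used i i best =
      if pvP scr used tok i then (i : Int)
      else if best = -1 then pvOptToInt ((List.range' i (scr.length - i)).find? (pvP scr used tok)) else best := by
  rw [pvScanA, dif_pos hi]
  by_cases hp : used.getD i false = false ∧ scr.getD i "" = tok
  · rw [if_pos hp, if_pos rfl, if_pos ((pvP_iff scr used tok i).mpr hp)]
  · rw [if_neg hp, if_neg (show ¬ pvP scr used tok i = true by simpa [pvP_iff] using hp),
      pvScanA_post scr tok used i scr.length (i + 1) best (by omega) (by omega),
      pvRange'_cons scr.length i hi,
      List.find?_cons_of_neg (by simpa [pvP_iff] using hp)]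

lemma pvScanA_pre (scr : List String) (tok : String) (used : List Bool) (i : Nat)
    (hi : i < scr.length) :
    ∀ fuel j best, i - j ≤ fuel → j ≤ i →
      pvScanA scr tok used i j best =
        if pvP scr used tok i then (i : Int)
        else if best = -1 then pvOptToInt ((List.range' j (scr.length - j)).find? (pvP scr used tok)) else best := by
  intro fuel
  induction fuel with
  | zero =>
    intro j best hf hji
    have : j = i := by omega
    subst this
    exact pvScanA_at_i scr tok used j hi best
  | succ fuel ih =>
    intro j best hf hji
    by_cases hje : j = i
    · subst hje
      exact pvScanA_at_i scr tok used j hi best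
    · have hjlt : j < i := by omega
      have hj : j < scr.length := by omega
      rw [pvScanA, dif_pos hj, pvRange'_cons scr.length j hj]
      by_cases hp : used.getD j false = false ∧ scr.getD j "" = tok
      · rw [if_pos hp, if_neg hje,
          List.find?_cons_of_pos ((pvP_iff scr used tok j).mpr hp),
          ih (j + 1) _ (by omega) (by omega)]
        by_cases hpi : pvP scr used tok i = true
        · rw [if_pos hpi, if_pos hpi]
        · rw [if_neg hpi, if_neg hpi]
          by_cases hb : best = -1
          · subst hb
            rw [if_pos rfl, if_pos rfl, if_neg (show ¬ ((j : Nat) : Int) = -1 by omega)]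
            simp [pvOptToInt]
          · simp only [if_neg hb]
      · rw [if_neg hp, List.find?_cons_of_neg (by simpa [pvP_iff] using hp),
          ih (j + 1) _ (by omega) (by omega)]

lemma pvScanA_spec (scr : List String) (tok : String) (used : List Bool) (i : Nat)
    (hi : i < scr.length) :
    pvScanA scr tok used i 0 (-1) =
      if pvP scr used tok i then (i : Int)
      else pvOptToInt ((List.range scr.length).find? (pvP scr used tok)) := by
  have := pvScanA_pre scr tok used i hi i 0 (-1) (by omega) (by omega)
  rw [this, List.range_eq_range']
  simp

-- ---------- phase I: the greedy matching decomposes per token ----------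

-- target slots of tok from index i on, ascending
def pvTi (tgt : List String) (tok : String) (i : Nat) : List Int :=
  ((List.range' i (tgt.length - i)).filter (fun k => tgt.getD k "" == tok)).map Int.ofNat

-- one token's greedy succeeds? (diagonal if present, else pop the head)
def pvTwOk : List Int → List Int → Bool
  | [], _ => true
  | i :: tis, avail =>
    if avail.contains i then pvTwOk tis (avail.erase i)
    else
      match avail with
      | [] => false
      | _ :: rest => pvTwOk tis rest

-- the slot one token's greedy assigns to target index k
def pvTwA : List Int → List Int → Int → Int
  | [], _, _ => 0
  | i :: tis, avail, k =>
    if avail.contains i then (if i = k then i else pvTwA tis (avail.erase i) k)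
    else
      match avail with
      | [] => 0
      | b :: rest => if i = k then b else pvTwA tis rest k

lemma pvTwOk_cons (i : Int) (tis avail : List Int) :
    pvTwOk (i :: tis) avail =
      if avail.contains i then pvTwOk tis (avail.erase i)
      else match avail with | [] => false | _ :: rest => pvTwOk tis rest := rfl

lemma pvTwA_cons (i : Int) (tis avail : List Int) (k : Int) :
    pvTwA (i :: tis) avail k =
      if avail.contains i then (if i = k then i else pvTwA tis (avail.erase i) k)
      else match avail with | [] => 0 | b :: rest => if i = k then b else pvTwA tis rest k := rfl

-- function update for the ghost per-token state
def pvUpd (f : String → List Int) (tok : String) (l : List Int) : String → List Int :=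
  fun t => if t = tok then l else f t

-- ghost process: A's loop with the per-token free lists made explicit
def pvGRun (tgt : List String) (i : Nat) (f : String → List Int) (perm : List Int) : Option (List Int) :=
  if _h : i < tgt.length then
    if (f (tgt.getD i "")).contains (i : Int) then
      pvGRun tgt (i + 1) (pvUpd f (tgt.getD i "") ((f (tgt.getD i "")).erase (i : Int))) (perm.set i (i : Int))
    else
      match hm : f (tgt.getD i "") with
      | [] => none
      | b :: rest => pvGRun tgt (i + 1) (pvUpd f (tgt.getD i "") rest) (perm.set i b)
  else some perm
termination_by tgt.length - i

lemma pvTi_step (tgt : List String) (tok : String) (i : Nat) (h : i < tgt.length) :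
    pvTi tgt tok i =
      if tgt.getD i "" = tok then (i : Int) :: pvTi tgt tok (i + 1) else pvTi tgt tok (i + 1) := by
  unfold pvTi
  rw [pvRange'_cons tgt.length i h]
  by_cases ht : tgt.getD i "" = tok
  · rw [if_pos ht, List.filter_cons_of_pos (by simpa using ht)]
    simp
  · rw [if_neg ht, List.filter_cons_of_neg (by simpa using ht)]

lemma pvMem_Ti (tgt : List String) (tok : String) (i k : Nat) :
    ((k : Int) ∈ pvTi tgt tok i) ↔ (i ≤ k ∧ k < tgt.length ∧ tgt.getD k "" = tok) := by
  unfold pvTi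
  constructor
  · intro hx
    obtain ⟨m, hm, he⟩ := List.mem_map.mp hx
    have h1 := List.mem_filter.mp hm
    have h2 := List.mem_range'_1.mp h1.1
    simp only [Int.ofNat_eq_natCast] at he
    have : m = k := by exact_mod_cast he
    subst this
    exact ⟨h2.1, by omega, by simpa using h1.2⟩
  · intro ⟨h1, h2, h3⟩
    exact List.mem_map.mpr ⟨k, List.mem_filter.mpr ⟨List.mem_range'_1.mpr ⟨h1, by omega⟩, by simpa using h3⟩, rfl⟩

lemma pvTi_nonneg (tgt : List String) (tok : String) (i : Nat) :
    ∀ x ∈ pvTi tgt tok i, 0 ≤ x := by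
  intro x hx
  obtain ⟨m, _, rfl⟩ := List.mem_map.mp hx
  exact Int.natCast_nonneg m

lemma pvTi_nodup (tgt : List String) (tok : String) (i : Nat) : (pvTi tgt tok i).Nodup := by
  unfold pvTi
  exact ((List.nodup_range').filter _).map (fun a b h => Int.ofNat.inj h)

lemma pvTi_zero (tgt : List String) (tok : String) :
    pvTi tgt tok 0 = pvInvList tgt (List.replicate tgt.length false) tok := by
  unfold pvTi pvInvList
  rw [List.range_eq_range']
  congr 1
  apply List.filter_congr
  intro k hk
  simp [pvP]

-- A's loop equals the ghost per-token-state process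
lemma pvPermA_eq_gRun (scr tgt : List String) (hlen : tgt.length = scr.length) :
    ∀ fuel i used perm, tgt.length - i ≤ fuel → used.length = scr.length →
      pvPermA scr tgt i used perm = pvGRun tgt i (fun tok => pvInvList scr used tok) perm := by
  intro fuel
  induction fuel with
  | zero =>
    intro i used perm hf hu
    rw [pvPermA, pvGRun, dif_neg (by omega), dif_neg (by omega)]
  | succ fuel ih =>
    intro i used perm hf hu
    by_cases hi : i < tgt.length
    · have hisc : i < scr.length := by omega
      have hscan := pvScanA_spec scr (tgt.getD i "") used i hisc
      rw [pvPermA, pvGRun, dif_pos hi, dif_pos hi]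
      simp only []
      by_cases hp : pvP scr used (tgt.getD i "") i = true
      · -- diagonal case
        have hmem : ((i : Nat) : Int) ∈ pvInvList scr used (tgt.getD i "") :=
          (pvMem_invList scr used (tgt.getD i "") i).mpr ⟨hisc, hp⟩
        have hcont : (pvInvList scr used (tgt.getD i "")).contains ((i : Nat) : Int) = true := by
          exact List.elem_eq_true_of_mem hmem
        rw [hscan, if_pos hp, if_neg (show ¬ ((i : Nat) : Int) = -1 by omega), hcont, if_pos rfl]
        rw [show (((i : Nat) : Int)).toNat = i by omega]
        rw [ih (i + 1) (used.set i true) (perm.set i ((i : Nat) : Int)) (by omega) (by simp [hu])]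
        congr 1
        funext t
        rw [pvInvList_set scr used t i (by omega), pvUpd]
        have hsi : scr.getD i "" = tgt.getD i "" := ((pvP_iff _ _ _ _).mp hp).2
        by_cases ht : t = tgt.getD i ""
        · rw [if_pos ht, ht]
        · rw [if_neg ht, List.erase_of_not_mem (pvNotMem_invList scr used t (tgt.getD i "") i hsi ht)]
      · -- non-diagonal case
        have hnmem : ((i : Nat) : Int) ∉ pvInvList scr used (tgt.getD i "") := by
          rw [pvMem_invList]
          intro hc
          exact hp hc.2
        have hcont : (pvInvList scr used (tgt.getD i "")).contains ((i : Nat) : Int) = false := by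
          rw [← Bool.not_eq_true]
          intro hc
          exact hnmem (List.mem_of_elem_eq_true hc)
        rw [hscan, if_neg hp, hcont, pvFind_eq_head]
        simp only [Bool.false_eq_true, if_false]
        cases hfl : (List.range scr.length).filter (pvP scr used (tgt.getD i "")) with
        | nil =>
          have havail : pvInvList scr used (tgt.getD i "") = [] := by
            unfold pvInvList
            rw [hfl]
            rfl
          rw [havail]
          simp [pvOptToInt]
        | cons k0 ks =>
          have havail : pvInvList scr used (tgt.getD i "") = ((k0 : Int)) :: ks.map Int.ofNat := by
            unfold pvInvList
            rw [hfl]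
            rfl
          have hk0 : k0 ∈ (List.range scr.length).filter (pvP scr used (tgt.getD i "")) := by
            rw [hfl]
            exact List.mem_cons_self
          have hk0f := List.mem_filter.mp hk0
          have hk0n : k0 < scr.length := List.mem_range.mp hk0f.1
          have hk0s : scr.getD k0 "" = tgt.getD i "" := ((pvP_iff _ _ _ _).mp hk0f.2).2
          rw [havail]
          simp only [List.head?_cons, pvOptToInt]
          rw [if_neg (show ¬ ((k0 : Nat) : Int) = -1 by omega)]
          rw [show (((k0 : Nat) : Int)).toNat = k0 by omega]
          rw [ih (i + 1) (used.set k0 true) (perm.set i ((k0 : Nat) : Int)) (by omega) (by simp [hu])]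
          congr 1
          funext t
          rw [pvInvList_set scr used t k0 (by omega), pvUpd]
          by_cases ht : t = tgt.getD i ""
          · rw [if_pos ht, ht, havail, List.erase_cons_head]
          · rw [if_neg ht, List.erase_of_not_mem (pvNotMem_invList scr used t (tgt.getD i "") k0 hk0s ht)]
    · rw [pvPermA, pvGRun, dif_neg hi, dif_neg hi]

lemma pvTi_ne_nil_mem (tgt : List String) (tok : String) (j : Nat)
    (h : pvTi tgt tok j ≠ []) : tok ∈ tgt.drop j := by
  obtain ⟨x, hx⟩ := List.exists_mem_of_ne_nil _ h
  unfold pvTi at hx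
  obtain ⟨k, hk, -⟩ := List.mem_map.mp hx
  have h1 := List.mem_filter.mp hk
  have h2 := List.mem_range'_1.mp h1.1
  have h3 : tgt.getD k "" = tok := by simpa using h1.2
  have hkl : k < tgt.length := by omega
  have hjk : j ≤ k := h2.1
  have : (tgt.drop j)[k - j]'(by rw [List.length_drop]; omega) = tok := by
    rw [List.getElem_drop, ← h3, List.getD_eq_getElem _ _ hkl]
    congr 1
    omega
  rw [← this]
  exact List.getElem_mem _

-- pointwise characterization of the ghost process by the per-token greedy
lemma pvGRun_spec (tgt : List String) :
    ∀ fuel i f perm, tgt.length - i ≤ fuel → tgt.length ≤ perm.length →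
      (pvGRun tgt i f perm = none ↔ ∃ tok ∈ tgt.drop i, pvTwOk (pvTi tgt tok i) (f tok) = false) ∧
      (∀ p, pvGRun tgt i f perm = some p →
        p.length = perm.length ∧
        (∀ k, (k < i ∨ tgt.length ≤ k) → p.getD k 0 = perm.getD k 0) ∧
        (∀ k, i ≤ k → k < tgt.length →
          p.getD k 0 = pvTwA (pvTi tgt (tgt.getD k "") i) (f (tgt.getD k "")) (k : Int))) := by
  intro fuel
  induction fuel with
  | zero =>
    intro i f perm hf hpl
    have hi : ¬ i < tgt.length := by omega
    rw [pvGRun, dif_neg hi]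
    refine ⟨?_, ?_⟩
    · rw [List.drop_eq_nil_of_le (by omega)]
      simp
    · rintro p hp
      cases hp
      exact ⟨rfl, fun k _ => rfl, fun k h1 h2 => by omega⟩
  | succ fuel ih =>
    intro i f perm hf hpl
    by_cases hi : i < tgt.length
    · have hdrop : tgt.drop i = tgt.getD i "" :: tgt.drop (i + 1) := by
        rw [List.drop_eq_getElem_cons hi, List.getD_eq_getElem _ _ hi]
      have hTi0 : pvTi tgt (tgt.getD i "") i = (i : Int) :: pvTi tgt (tgt.getD i "") (i + 1) := by
        rw [pvTi_step tgt _ i hi, if_pos rfl]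
      have hTine : ∀ tok, tok ≠ tgt.getD i "" → pvTi tgt tok i = pvTi tgt tok (i + 1) := by
        intro tok htok
        rw [pvTi_step tgt tok i hi, if_neg (fun hh => htok hh.symm)]
      rw [pvGRun, dif_pos hi]
      by_cases hc : (f (tgt.getD i "")).contains ((i : Nat) : Int) = true
      · rw [if_pos hc]
        set f' := pvUpd f (tgt.getD i "") ((f (tgt.getD i "")).erase ((i : Nat) : Int)) with hf'
        have hok : ∀ tok, pvTwOk (pvTi tgt tok i) (f tok) = pvTwOk (pvTi tgt tok (i + 1)) (f' tok) := by
          intro tok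
          by_cases htok : tok = tgt.getD i ""
          · subst htok
            rw [hTi0, pvTwOk_cons, hc, if_pos rfl, hf', pvUpd, if_pos rfl]
          · rw [hTine tok htok, hf', pvUpd, if_neg htok]
        have htwA : ∀ k : Nat, i < k → k < tgt.length →
            pvTwA (pvTi tgt (tgt.getD k "") i) (f (tgt.getD k "")) (k : Int)
              = pvTwA (pvTi tgt (tgt.getD k "") (i + 1)) (f' (tgt.getD k "")) (k : Int) := by
          intro k hik hk
          by_cases htok : tgt.getD k "" = tgt.getD i ""
          · rw [htok, hTi0, pvTwA_cons, hc, if_pos rfl, if_neg (show ¬ ((i:Nat):Int) = (k:Int) by omega),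
              hf', pvUpd, if_pos rfl]
          · rw [hTine _ htok, hf', pvUpd, if_neg htok]
        obtain ⟨ih1, ih2⟩ := ih (i + 1) f' (perm.set i ((i : Nat) : Int)) (by omega) (by simpa using hpl)
        refine ⟨?_, ?_⟩
        · rw [ih1, hdrop]
          constructor
          · rintro ⟨tok, hmem, hko⟩
            exact ⟨tok, List.mem_cons_of_mem _ hmem, by rw [hok tok]; exact hko⟩
          · rintro ⟨tok, hmem, hko⟩
            rw [hok tok] at hko
            rcases List.mem_cons.mp hmem with h | h
            · have hne : pvTi tgt tok (i + 1) ≠ [] := by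
                intro hnil
                rw [hnil] at hko
                simp [pvTwOk] at hko
              exact ⟨tok, pvTi_ne_nil_mem tgt tok (i + 1) hne, hko⟩
            · exact ⟨tok, h, hko⟩
        · intro p hp
          obtain ⟨hl, hout, hin⟩ := ih2 p hp
          refine ⟨by simpa using hl, ?_, ?_⟩
          · intro k hk
            have := hout k (by omega)
            rw [this, pvGetD_set, if_neg (by omega)]
          · intro k h1 h2
            by_cases hik : k = i
            · subst hik
              have := hout k (by omega)
              rw [this, pvGetD_set, if_pos ⟨rfl, by omega⟩, hTi0, pvTwA_cons, hc, if_pos rfl, if_pos rfl]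
            · rw [hin k (by omega) h2, htwA k (by omega) h2]
      · rw [if_neg hc]
        split
        · next hav =>
          refine ⟨?_, by rintro p ⟨⟩⟩
          constructor
          · intro _
            refine ⟨tgt.getD i "", by rw [hdrop]; exact List.mem_cons_self, ?_⟩
            rw [hTi0, pvTwOk_cons, if_neg (by simpa using hc), hav]
          · intro _
            rfl
        · next b rest hav =>
          set f' := pvUpd f (tgt.getD i "") rest with hf'
          have hok : ∀ tok, pvTwOk (pvTi tgt tok i) (f tok) = pvTwOk (pvTi tgt tok (i + 1)) (f' tok) := by
            intro tok
            by_cases htok : tok = tgt.getD i ""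
            · subst htok
              rw [hTi0, pvTwOk_cons, if_neg (by simpa using hc), hav, hf', pvUpd]
              simp
            · rw [hTine tok htok, hf', pvUpd, if_neg htok]
          have htwA : ∀ k : Nat, i < k → k < tgt.length →
              pvTwA (pvTi tgt (tgt.getD k "") i) (f (tgt.getD k "")) (k : Int)
                = pvTwA (pvTi tgt (tgt.getD k "") (i + 1)) (f' (tgt.getD k "")) (k : Int) := by
            intro k hik hk
            by_cases htok : tgt.getD k "" = tgt.getD i ""
            · rw [htok, hTi0, pvTwA_cons, if_neg (by simpa using hc), hav, hf', pvUpd]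
              simp [show ¬ ((i:Nat):Int) = (k:Int) by omega]
            · rw [hTine _ htok, hf', pvUpd, if_neg htok]
          obtain ⟨ih1, ih2⟩ := ih (i + 1) f' (perm.set i b) (by omega) (by simpa using hpl)
          refine ⟨?_, ?_⟩
          · rw [ih1, hdrop]
            constructor
            · rintro ⟨tok, hmem, hko⟩
              exact ⟨tok, List.mem_cons_of_mem _ hmem, by rw [hok tok]; exact hko⟩
            · rintro ⟨tok, hmem, hko⟩
              rw [hok tok] at hko
              rcases List.mem_cons.mp hmem with h | h
              · have hne : pvTi tgt tok (i + 1) ≠ [] := by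
                  intro hnil
                  rw [hnil] at hko
                  simp [pvTwOk] at hko
                exact ⟨tok, pvTi_ne_nil_mem tgt tok (i + 1) hne, hko⟩
              · exact ⟨tok, h, hko⟩
          · intro p hp
            obtain ⟨hl, hout, hin⟩ := ih2 p hp
            refine ⟨by simpa using hl, ?_, ?_⟩
            · intro k hk
              have := hout k (by omega)
              rw [this, pvGetD_set, if_neg (by omega)]
            · intro k h1 h2
              by_cases hik : k = i
              · subst hik
                have := hout k (by omega)
                rw [this, pvGetD_set, if_pos ⟨rfl, by omega⟩, hTi0, pvTwA_cons, if_neg (by simpa using hc), hav]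
                simp
              · rw [hin k (by omega) h2, htwA k (by omega) h2]
    · rw [pvGRun, dif_neg hi]
      refine ⟨?_, ?_⟩
      · rw [List.drop_eq_nil_of_le (by omega)]
        simp
      · rintro p hp
        cases hp
        exact ⟨rfl, fun k _ => rfl, fun k h1 h2 => by omega⟩

lemma pvTokRun_cons (i : Int) (tis avail perm : List Int) :
    pvTokRun (i :: tis) avail perm =
      if avail.contains i then pvTokRun tis ((PySem.List.remove? avail i).getD avail) perm
      else match avail with
        | [] => none
        | b :: rest => pvTokRun tis rest (perm.set i.toNat b) := rfl

-- characterization of B's single-token loop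
lemma pvTokRun_spec :
    ∀ (tis avail perm : List Int), tis.Nodup → (∀ x ∈ tis, 0 ≤ x) →
      (∀ k : Nat, (k : Int) ∈ tis → k < perm.length ∧ perm.getD k 0 = (k : Int)) →
      (pvTokRun tis avail perm = none ↔ pvTwOk tis avail = false) ∧
      (∀ p, pvTokRun tis avail perm = some p →
        p.length = perm.length ∧
        (∀ k : Nat, (k : Int) ∉ tis → p.getD k 0 = perm.getD k 0) ∧
        (∀ k : Nat, (k : Int) ∈ tis → p.getD k 0 = pvTwA tis avail (k : Int))) := by
  intro tis
  induction tis with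
  | nil =>
    intro avail perm _ _ _
    refine ⟨by simp [pvTokRun, pvTwOk], ?_⟩
    rintro p hp
    cases hp
    exact ⟨rfl, fun k _ => rfl, fun k hk => by simp at hk⟩
  | cons i tis ih =>
    intro avail perm hnd hpos hid
    have hnd' := (List.nodup_cons.mp hnd).2
    have hnmem := (List.nodup_cons.mp hnd).1
    have hpos' : ∀ x ∈ tis, 0 ≤ x := fun x hx => hpos x (List.mem_cons_of_mem _ hx)
    have hi0 : 0 ≤ i := hpos i List.mem_cons_self
    have hitn : ((i.toNat : Nat) : Int) = i := by omega
    by_cases hc : avail.contains i = true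
    · have hmem : i ∈ avail := List.mem_of_elem_eq_true hc
      have hrem : (PySem.List.remove? avail i).getD avail = avail.erase i := by
        rw [PySem.List.remove?_eq_some_erase _ _ hmem]
        rfl
      rw [pvTokRun_cons, hc, if_pos rfl, hrem]
      obtain ⟨ih1, ih2⟩ := ih (avail.erase i) perm hnd' hpos'
        (fun k hk => hid k (List.mem_cons_of_mem _ hk))
      refine ⟨by rw [ih1, pvTwOk_cons, hc, if_pos rfl], ?_⟩
      intro p hp
      obtain ⟨hl, hout, hin⟩ := ih2 p hp
      refine ⟨hl, ?_, ?_⟩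
      · intro k hk
        exact hout k (fun hk' => hk (List.mem_cons_of_mem _ hk'))
      · intro k hk
        rw [pvTwA_cons, hc, if_pos rfl]
        rcases List.mem_cons.mp hk with h | h
        · have hknot : (k : Int) ∉ tis := by rw [← h] at hnmem; exact hnmem
          rw [hout k hknot, (hid k hk).2, if_pos h.symm, h]
        · have hik : ¬ i = (k : Int) := by
            intro he
            rw [he] at hnmem
            exact hnmem h
          rw [if_neg hik, hin k h]
    · rw [pvTokRun_cons, if_neg (by simpa using hc)]
      cases hav : avail with
      | nil =>
        subst hav
        refine ⟨by rw [pvTwOk_cons, if_neg hc]; simp, ?_⟩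
        rintro p ⟨⟩
      | cons b rest =>
        subst hav
        have hidset : ∀ k : Nat, (k : Int) ∈ tis →
            k < (perm.set i.toNat b).length ∧ (perm.set i.toNat b).getD k 0 = (k : Int) := by
          intro k hk
          have hne : ¬ k = i.toNat := by
            intro he
            rw [he, hitn] at hk
            exact hnmem hk
          have h0 := hid k (List.mem_cons_of_mem _ hk)
          refine ⟨by simpa using h0.1, ?_⟩
          rw [pvGetD_set, if_neg (by tauto)]
          exact h0.2
        obtain ⟨ih1, ih2⟩ := ih rest (perm.set i.toNat b) hnd' hpos' hidset
        refine ⟨by rw [ih1, pvTwOk_cons, if_neg hc], ?_⟩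
        intro p hp
        obtain ⟨hl, hout, hin⟩ := ih2 p hp
        have hitl : i.toNat < perm.length := by
          have := (hid i.toNat (by rw [hitn]; exact List.mem_cons_self)).1
          exact this
        refine ⟨by simpa using hl, ?_, ?_⟩
        · intro k hk
          have hknt : (k : Int) ∉ tis := fun h => hk (List.mem_cons_of_mem _ h)
          have hkne : ¬ k = i.toNat := by
            intro he
            apply hk
            rw [he, hitn]
            exact List.mem_cons_self
          rw [hout k hknt, pvGetD_set, if_neg (by tauto)]
        · intro k hk
          rw [pvTwA_cons, if_neg hc]
          show p.getD k 0 = if i = (k : Int) then b else pvTwA tis rest (k : Int)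
          rcases List.mem_cons.mp hk with h | h
          · have hknot : (k : Int) ∉ tis := by rw [← h] at hnmem; exact hnmem
            have hke : k = i.toNat := by omega
            rw [hout k hknot, pvGetD_set, if_pos ⟨hke, by omega⟩, if_pos h.symm]
          · have hik : ¬ i = (k : Int) := by
              intro he
              rw [he] at hnmem
              exact hnmem h
            rw [if_neg hik, hin k h]

lemma pvAllTok_cons (spos : PySem.Dict String (List Int)) (tok : String)
    (tis : List Int) (rest : List (String × List Int)) (perm : List Int) :
    pvAllTok spos ((tok, tis) :: rest) perm =
      match pvTokRun tis (spos.getD tok []) perm with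
      | none => none
      | some perm' => pvAllTok spos rest perm' := rfl

lemma pvTi_token (tgt : List String) (tok : String) (k : Nat)
    (h : (k : Int) ∈ pvTi tgt tok 0) : tgt.getD k "" = tok :=
  ((pvMem_Ti tgt tok 0 k).mp h).2.2

-- characterization of B's loop over the token groups
lemma pvAllTok_spec (tgt : List String) (spos : PySem.Dict String (List Int)) :
    ∀ (items : List (String × List Int)) (perm : List Int),
      (∀ q ∈ items, q.2 = pvTi tgt q.1 0) →
      (items.map Prod.fst).Nodup →
      (∀ k : Nat, (∃ q ∈ items, (k : Int) ∈ q.2) → k < perm.length ∧ perm.getD k 0 = (k : Int)) →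
      (pvAllTok spos items perm = none ↔ ∃ q ∈ items, pvTwOk q.2 (spos.getD q.1 []) = false) ∧
      (∀ p, pvAllTok spos items perm = some p →
        p.length = perm.length ∧
        (∀ k : Nat, (¬ ∃ q ∈ items, (k : Int) ∈ q.2) → p.getD k 0 = perm.getD k 0) ∧
        (∀ k : Nat, ∀ q ∈ items, (k : Int) ∈ q.2 →
          p.getD k 0 = pvTwA q.2 (spos.getD q.1 []) (k : Int))) := by
  intro items
  induction items with
  | nil =>
    intro perm _ _ _
    refine ⟨by simp [pvAllTok], ?_⟩
    rintro p hp
    cases hp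
    exact ⟨rfl, fun k _ => rfl, fun k q hq => by simp at hq⟩
  | cons q rest ih =>
    intro perm hq hnd hid
    obtain ⟨tok, tis⟩ := q
    have htis : tis = pvTi tgt tok 0 := hq (tok, tis) List.mem_cons_self
    have hqrest : ∀ q ∈ rest, q.2 = pvTi tgt q.1 0 := fun q hq' => hq q (List.mem_cons_of_mem _ hq')
    have hndrest : (rest.map Prod.fst).Nodup := (List.nodup_cons.mp hnd).2
    have htoknotin : tok ∉ rest.map Prod.fst := (List.nodup_cons.mp hnd).1
    have hdisj : ∀ (k : Nat) q', q' ∈ rest → (k : Int) ∈ q'.2 → (k : Int) ∉ tis := by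
      intro k q' hq' hkq' hktis
      have h1 : tgt.getD k "" = q'.1 := by
        rw [hqrest q' hq'] at hkq'
        exact pvTi_token tgt q'.1 k hkq'
      have h2 : tgt.getD k "" = tok := by
        rw [htis] at hktis
        exact pvTi_token tgt tok k hktis
      exact htoknotin (List.mem_map.mpr ⟨q', hq', by rw [← h1, h2]⟩)
    obtain ⟨t1, t2⟩ := pvTokRun_spec tis (spos.getD tok []) perm
      (htis ▸ pvTi_nodup tgt tok 0) (htis ▸ pvTi_nonneg tgt tok 0)
      (fun k hk => hid k ⟨(tok, tis), List.mem_cons_self, hk⟩)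
    rw [pvAllTok_cons]
    cases hrun : pvTokRun tis (spos.getD tok []) perm with
    | none =>
      have hok : pvTwOk tis (spos.getD tok []) = false := t1.mp hrun
      refine ⟨?_, by rintro p ⟨⟩⟩
      constructor
      · intro _
        exact ⟨(tok, tis), List.mem_cons_self, hok⟩
      · intro _
        rfl
    | some p1 =>
      obtain ⟨hl1, hout1, hin1⟩ := t2 p1 hrun
      have hokhead : ¬ pvTwOk tis (spos.getD tok []) = false := by
        intro hf
        rw [← t1] at hf
        rw [hrun] at hf
        cases hf
      obtain ⟨ih1, ih2⟩ := ih p1 hqrest hndrest (by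
        intro k hk
        obtain ⟨q', hq', hkq'⟩ := hk
        have hknotis : (k : Int) ∉ tis := hdisj k q' hq' hkq'
        have h0 := hid k ⟨q', List.mem_cons_of_mem _ hq', hkq'⟩
        exact ⟨by rw [hl1]; exact h0.1, by rw [hout1 k hknotis]; exact h0.2⟩)
      refine ⟨?_, ?_⟩
      · rw [ih1]
        constructor
        · rintro ⟨q', hq', hko⟩
          exact ⟨q', List.mem_cons_of_mem _ hq', hko⟩
        · rintro ⟨q', hq', hko⟩
          rcases List.mem_cons.mp hq' with h | h
          · rw [h] at hko
            exact absurd hko hokhead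
          · exact ⟨q', h, hko⟩
      · intro p hp
        obtain ⟨hl2, hout2, hin2⟩ := ih2 p hp
        refine ⟨by rw [hl2, hl1], ?_, ?_⟩
        · intro k hk
          have hk1 : ¬ ∃ q' ∈ rest, (k : Int) ∈ q'.2 := by
            intro ⟨q', hq', hkq'⟩
            exact hk ⟨q', List.mem_cons_of_mem _ hq', hkq'⟩
          have hk2 : (k : Int) ∉ tis := by
            intro hkt
            exact hk ⟨(tok, tis), List.mem_cons_self, hkt⟩
          rw [hout2 k hk1, hout1 k hk2]
        · intro k q' hq' hkq'
          rcases List.mem_cons.mp hq' with h | h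
          · have hkt : (k : Int) ∈ tis := by have := hkq'; rw [h] at this; exact this
            have hk1 : ¬ ∃ q'' ∈ rest, (k : Int) ∈ q''.2 := by
              intro ⟨q'', hq'', hkq''⟩
              exact hdisj k q'' hq'' hkq'' hkt
            rw [hout2 k hk1, hin1 k hkt, h]
          · exact hin2 k q' h hkq'

-- slot values chosen by one token's greedy lie in its free list
lemma pvTwA_mem : ∀ (tis avail : List Int) (k : Int),
    pvTwOk tis avail = true → k ∈ tis → pvTwA tis avail k ∈ avail := by
  intro tis
  induction tis with
  | nil => intro avail k _ hk; simp at hk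
  | cons i tis ih =>
    intro avail k hok hk
    rw [pvTwA_cons]
    rw [pvTwOk_cons] at hok
    by_cases hc : avail.contains i = true
    · rw [hc, if_pos rfl] at hok ⊢
      by_cases hik : i = k
      · rw [if_pos hik]
        exact List.mem_of_elem_eq_true hc
      · rw [if_neg hik]
        have hkt : k ∈ tis := by
          rcases List.mem_cons.mp hk with h | h
          · exact absurd h.symm hik
          · exact h
        exact List.mem_of_mem_erase (ih (avail.erase i) k hok hkt)
    · rw [if_neg hc] at hok ⊢
      cases avail with
      | nil => cases hok
      | cons b rest =>
        show (if i = k then b else pvTwA tis rest k) ∈ b :: rest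
        by_cases hik : i = k
        · rw [if_pos hik]
          exact List.mem_cons_self
        · rw [if_neg hik]
          have hkt : k ∈ tis := by
            rcases List.mem_cons.mp hk with h | h
            · exact absurd h.symm hik
            · exact h
          exact List.mem_cons_of_mem _ (ih rest k hok hkt)

-- distinct target slots of one token receive distinct scrambled slots
lemma pvTwA_inj : ∀ (tis avail : List Int) (k k' : Int),
    tis.Nodup → avail.Nodup → pvTwOk tis avail = true → k ∈ tis → k' ∈ tis → k ≠ k' →
    pvTwA tis avail k ≠ pvTwA tis avail k' := by
  intro tis
  induction tis with
  | nil => intro avail k k' _ _ _ hk; simp at hk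
  | cons i tis ih =>
    intro avail k k' hnd hand hok hk hk' hkk
    have hnd' := (List.nodup_cons.mp hnd).2
    have hinotin := (List.nodup_cons.mp hnd).1
    rw [pvTwA_cons, pvTwA_cons]
    rw [pvTwOk_cons] at hok
    by_cases hc : avail.contains i = true
    · rw [hc, if_pos rfl] at hok ⊢
      rw [if_pos rfl]
      by_cases hik : i = k
      · rw [if_pos hik, if_neg (show ¬ i = k' by rw [hik]; exact hkk)]
        have hkt : k' ∈ tis := by
          rcases List.mem_cons.mp hk' with h | h
          · exact absurd (hik.symm.trans h.symm) hkk
          · exact h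
        have hv := pvTwA_mem tis (avail.erase i) k' hok hkt
        intro he
        rw [← he] at hv
        exact (List.Nodup.not_mem_erase hand) hv
      · rw [if_neg hik]
        by_cases hik' : i = k'
        · rw [if_pos hik']
          have hkt : k ∈ tis := by
            rcases List.mem_cons.mp hk with h | h
            · exact absurd h.symm hik
            · exact h
          have hv := pvTwA_mem tis (avail.erase i) k hok hkt
          intro he
          rw [he] at hv
          exact (List.Nodup.not_mem_erase hand) hv
        · rw [if_neg hik']
          have hkt : k ∈ tis := by
            rcases List.mem_cons.mp hk with h | h
            · exact absurd h.symm hik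
            · exact h
          have hkt' : k' ∈ tis := by
            rcases List.mem_cons.mp hk' with h | h
            · exact absurd h.symm hik'
            · exact h
          exact ih (avail.erase i) k k' hnd' (List.Nodup.erase _ hand) hok hkt hkt' hkk
    · rw [if_neg hc] at hok ⊢
      rw [if_neg hc]
      cases avail with
      | nil => cases hok
      | cons b rest =>
        show (if i = k then b else pvTwA tis rest k) ≠ (if i = k' then b else pvTwA tis rest k')
        have hbnotin := (List.nodup_cons.mp hand).1
        have hrestnd := (List.nodup_cons.mp hand).2
        by_cases hik : i = k
        · rw [if_pos hik, if_neg (show ¬ i = k' by rw [hik]; exact hkk)]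
          have hkt : k' ∈ tis := by
            rcases List.mem_cons.mp hk' with h | h
            · exact absurd (hik.symm.trans h.symm) hkk
            · exact h
          have hv := pvTwA_mem tis rest k' hok hkt
          intro he
          rw [← he] at hv
          exact hbnotin hv
        · rw [if_neg hik]
          by_cases hik' : i = k'
          · rw [if_pos hik']
            have hkt : k ∈ tis := by
              rcases List.mem_cons.mp hk with h | h
              · exact absurd h.symm hik
              · exact h
            have hv := pvTwA_mem tis rest k hok hkt
            intro he
            rw [he] at hv
            exact hbnotin hv
          · rw [if_neg hik']
            have hkt : k ∈ tis := by
              rcases List.mem_cons.mp hk with h | h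
              · exact absurd h.symm hik
              · exact h
            have hkt' : k' ∈ tis := by
              rcases List.mem_cons.mp hk' with h | h
              · exact absurd h.symm hik'
              · exact h
            exact ih rest k k' hnd' hrestnd hok hkt hkt' hkk

-- ---------- the grouping dict ----------

lemma pvGroup_getD (l : List String) (tok : String) :
    (pvGroup l).getD tok [] = pvTi l tok 0 := by
  have h1 : pvGroup l = ((PySem.List.enumerate l 0).map Prod.swap).foldl
      (fun d q => d.modify q.1 [] (· ++ [q.2])) PySem.Dict.empty := by
    rw [List.foldl_map]; rfl
  rw [h1, PySem.Dict.getD_foldl_modify_append]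
  rw [PySem.List.enumerate_eq_map_pyRange (d := "")]
  rw [PySem.List.pyRange_one]
  rw [pvTi_zero]
  unfold pvInvList
  simp only [List.map_map, List.filter_map, Function.comp_def, zero_add,
    PySem.Dict.getD_empty, List.nil_append, Prod.swap_prod_mk]
  rw [show (PySem.List.len l - 0).toNat = l.length by simp [PySem.List.len]]
  have hf : ∀ j ∈ List.range l.length,
      (PySem.List.pyGetD l (j : Int) "" == tok) = pvP l (List.replicate l.length false) tok j := by
    intro j hj
    simp [pvP, PySem.List.pyGetD_natCast]
  rw [List.filter_congr hf]
  apply List.map_congr_left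
  intro a _
  simp

lemma pvGroup_keys_nodup (l : List String) : (pvGroup l).keys.Nodup := by
  unfold pvGroup
  exact PySem.Dict.nodup_keys_foldl_modify_key _ _ _ _ _ PySem.Dict.nodup_keys_empty

lemma pvGroup_mem_keys (l : List String) (tok : String) :
    tok ∈ (pvGroup l).keys ↔ tok ∈ l := by
  unfold pvGroup
  rw [PySem.Dict.keys_foldl_modify_key]
  rw [PySem.Dict.keys_empty, PySem.Set.update_nil_left]
  rw [PySem.Set.mem_ofList, PySem.List.map_snd_enumerate]

-- ---------- the matching phases agree ----------

lemma pvMatch_eq (scr tgt : List String) (hlen : tgt.length = scr.length) :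
    pvPermA scr tgt 0 (List.replicate scr.length false) (List.replicate scr.length 0)
      = pvAllTok (pvGroup scr) (pvGroup tgt).items (PySem.List.pyRange 0 (scr.length : Int) 1) ∧
    (∀ p, pvPermA scr tgt 0 (List.replicate scr.length false) (List.replicate scr.length 0) = some p →
      p.length = scr.length ∧
      (∀ k, k < scr.length → 0 ≤ p.getD k 0 ∧ p.getD k 0 < (scr.length : Int) ∧
        scr.getD (p.getD k 0).toNat "" = tgt.getD k "") ∧
      (∀ a b, a < scr.length → b < scr.length → p.getD a 0 = p.getD b 0 → a = b)) := by
  have hf0 : (fun tok => pvInvList scr (List.replicate scr.length false) tok)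
      = (fun tok => pvTi scr tok 0) := by
    funext tok
    rw [pvTi_zero]
  have hA : pvPermA scr tgt 0 (List.replicate scr.length false) (List.replicate scr.length 0)
      = pvGRun tgt 0 (fun tok => pvTi scr tok 0) (List.replicate scr.length 0) := by
    rw [pvPermA_eq_gRun scr tgt hlen tgt.length 0 _ _ (by omega) (by simp), hf0]
  obtain ⟨hG1, hG2⟩ := pvGRun_spec tgt tgt.length 0 (fun tok => pvTi scr tok 0)
    (List.replicate scr.length 0) (by omega) (by simp [hlen])
  have hitems2 : ∀ q ∈ (pvGroup tgt).items, q.2 = pvTi tgt q.1 0 := by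
    intro q hq
    have := PySem.Dict.getD_of_mem_items (d := pvGroup tgt) (k := q.1) (v := q.2) (d0 := [])
      (by cases q; exact hq) (pvGroup_keys_nodup tgt)
    rw [← this, pvGroup_getD]
  have hfst : (pvGroup tgt).items.map Prod.fst = (pvGroup tgt).keys := rfl
  have hndfst : ((pvGroup tgt).items.map Prod.fst).Nodup := by
    rw [hfst]
    exact pvGroup_keys_nodup tgt
  have hlenpy : (PySem.List.pyRange 0 (scr.length : Int) 1).length = scr.length := by
    rw [PySem.List.length_pyRange_one]
    omega
  have hid0 : ∀ k : Nat, (∃ q ∈ (pvGroup tgt).items, (k : Int) ∈ q.2) →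
      k < (PySem.List.pyRange 0 (scr.length : Int) 1).length ∧
      (PySem.List.pyRange 0 (scr.length : Int) 1).getD k 0 = (k : Int) := by
    intro k hk
    obtain ⟨q, hq, hkq⟩ := hk
    rw [hitems2 q hq] at hkq
    have hkn : k < tgt.length := ((pvMem_Ti tgt q.1 0 k).mp hkq).2.1
    have hkn' : k < scr.length := by omega
    refine ⟨by rw [hlenpy]; exact hkn', ?_⟩
    rw [List.getD_eq_getElem _ _ (by rw [hlenpy]; exact hkn'), PySem.List.getElem_pyRange_one]
    omega
  obtain ⟨hB1, hB2⟩ := pvAllTok_spec tgt (pvGroup scr) (pvGroup tgt).items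
    (PySem.List.pyRange 0 (scr.length : Int) 1) hitems2 hndfst hid0
  have havail : ∀ tok, (pvGroup scr).getD tok [] = pvTi scr tok 0 := fun tok => pvGroup_getD scr tok
  have hmemtok : ∀ tok, tok ∈ tgt → ∃ q ∈ (pvGroup tgt).items, q.1 = tok := by
    intro tok htok
    have : tok ∈ (pvGroup tgt).keys := (pvGroup_mem_keys tgt tok).mpr htok
    rw [← hfst] at this
    obtain ⟨q, hq, he⟩ := List.mem_map.mp this
    exact ⟨q, hq, he⟩
  have htokk : ∀ k, k < tgt.length → tgt.getD k "" ∈ tgt := by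
    intro k hk
    rw [List.getD_eq_getElem _ _ hk]
    exact List.getElem_mem _
  constructor
  · rw [hA]
    cases hGA : pvGRun tgt 0 (fun tok => pvTi scr tok 0) (List.replicate scr.length 0) with
    | none =>
      obtain ⟨tok, htok, hko⟩ := hG1.mp hGA
      rw [List.drop_zero] at htok
      obtain ⟨q, hq, he⟩ := hmemtok tok htok
      symm
      rw [hB1]
      refine ⟨q, hq, ?_⟩
      rw [hitems2 q hq, havail, he]
      exact hko
    | some pA =>
      obtain ⟨hlA, houtA, hinA⟩ := hG2 pA hGA
      cases hGB : pvAllTok (pvGroup scr) (pvGroup tgt).items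
          (PySem.List.pyRange 0 (scr.length : Int) 1) with
      | none =>
        obtain ⟨q, hq, hko⟩ := hB1.mp hGB
        have hne : pvTi tgt q.1 0 ≠ [] := by
          intro hnil
          rw [hitems2 q hq, hnil] at hko
          simp [pvTwOk] at hko
        have htok : q.1 ∈ tgt := by
          have := pvTi_ne_nil_mem tgt q.1 0 hne
          rwa [List.drop_zero] at this
        exfalso
        have : pvGRun tgt 0 (fun tok => pvTi scr tok 0) (List.replicate scr.length 0) = none := by
          rw [hG1]
          refine ⟨q.1, by rw [List.drop_zero]; exact htok, ?_⟩
          rw [hitems2 q hq, havail] at hko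
          exact hko
        rw [hGA] at this
        cases this
      | some pB =>
        obtain ⟨hlB, houtB, hinB⟩ := hB2 pB hGB
        congr 1
        apply List.ext_getElem
        · rw [hlA, hlB, hlenpy]
          simp
        · intro k hk1 hk2
          have hkn : k < scr.length := by
            rw [hlA] at hk1
            simpa using hk1
          have hkt : k < tgt.length := by omega
          have h1 : pA.getD k 0 = pvTwA (pvTi tgt (tgt.getD k "") 0) (pvTi scr (tgt.getD k "") 0) (k : Int) :=
            hinA k (by omega) hkt
          obtain ⟨q, hq, he⟩ := hmemtok (tgt.getD k "") (htokk k hkt)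
          have hkq : (k : Int) ∈ q.2 := by
            rw [hitems2 q hq, he]
            exact (pvMem_Ti tgt _ 0 k).mpr ⟨by omega, hkt, rfl⟩
          have h2 : pB.getD k 0 = pvTwA q.2 ((pvGroup scr).getD q.1 []) (k : Int) :=
            hinB k q hq hkq
          rw [← List.getD_eq_getElem pA 0 hk1, ← List.getD_eq_getElem pB 0 hk2, h1, h2,
            hitems2 q hq, havail, he]
  · intro p hp
    rw [hA] at hp
    obtain ⟨hlA, houtA, hinA⟩ := hG2 p hp
    have hOk : ∀ tok, tok ∈ tgt → pvTwOk (pvTi tgt tok 0) (pvTi scr tok 0) = true := by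
      intro tok htok
      cases hko : pvTwOk (pvTi tgt tok 0) (pvTi scr tok 0) with
      | true => rfl
      | false =>
        exfalso
        have : pvGRun tgt 0 (fun tok => pvTi scr tok 0) (List.replicate scr.length 0) = none := by
          rw [hG1]
          exact ⟨tok, by rw [List.drop_zero]; exact htok, hko⟩
        rw [hp] at this
        cases this
    have hval : ∀ k, k < scr.length →
        p.getD k 0 ∈ pvTi scr (tgt.getD k "") 0 := by
      intro k hk
      have hkt : k < tgt.length := by omega
      rw [hinA k (by omega) hkt]
      exact pvTwA_mem _ _ _ (hOk _ (htokk k hkt))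
        ((pvMem_Ti tgt _ 0 k).mpr ⟨by omega, hkt, rfl⟩)
    refine ⟨by rw [hlA]; simp, ?_, ?_⟩
    · intro k hk
      have := hval k hk
      rw [pvTi_zero] at this
      have h3 := pvInvList_mem' scr _ _ _ this
      have h4 : scr.getD (p.getD k 0).toNat "" = tgt.getD k "" := h3.2.2
      exact ⟨h3.1, h3.2.1, h4⟩
    · intro a b ha hb hab
      by_contra hne
      have hat : a < tgt.length := by omega
      have hbt : b < tgt.length := by omega
      by_cases htok : tgt.getD a "" = tgt.getD b ""
      · have := pvTwA_inj (pvTi tgt (tgt.getD a "") 0) (pvTi scr (tgt.getD a "") 0)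
          (a : Int) (b : Int) (pvTi_nodup tgt _ 0)
          (by rw [pvTi_zero]; exact pvInvList_nodup scr _ _)
          (hOk _ (htokk a hat))
          ((pvMem_Ti tgt _ 0 a).mpr ⟨by omega, hat, rfl⟩)
          ((pvMem_Ti tgt _ 0 b).mpr ⟨by omega, hbt, htok.symm⟩)
          (by omega)
        apply this
        rw [← hinA a (by omega) hat, htok, ← hinA b (by omega) hbt]
        exact hab
      · have h3a := pvInvList_mem' scr _ _ _ (by rw [← pvTi_zero]; exact hval a ha)
        have h3b := pvInvList_mem' scr _ _ _ (by rw [← pvTi_zero]; exact hval b hb)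
        apply htok
        rw [← h3a.2.2, ← h3b.2.2, hab]

-- ---------- phase II: swap simulation counts n - cycles ----------

-- the permutation as a function on indices
def pvPf (perm : List Int) (k : Nat) : Nat := (perm.getD k 0).toNat

-- mark a list of indices visited
def pvMarkL : List Bool → List Nat → List Bool
  | v, [] => v
  | v, k :: ks => pvMarkL (v.set k true) ks

-- the first u nodes of the cycle through i
def pvCycN (perm : List Int) (i u : Nat) : List Nat :=
  (List.range u).map (fun a => (pvPf perm)^[a] i)

lemma pvCount_set (v : List Bool) (j : Nat) (hj : j < v.length) (hv : v.getD j false = false) :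
    (v.set j true).count true = v.count true + 1 := by
  induction v generalizing j with
  | nil => simp at hj
  | cons a t ih =>
    cases j with
    | zero =>
      simp [List.getD] at hv
      simp [hv]
    | succ j =>
      simp at hj
      have := ih j hj (by simpa [List.getD] using hv)
      cases a <;> simp [List.set, this]

lemma pvCount_all (v : List Bool) (h : ∀ k, k < v.length → v.getD k false = true) :
    v.count true = v.length := by
  induction v with
  | nil => rfl
  | cons a t ih =>
    have h0 := h 0 (by simp)
    simp [List.getD] at h0
    have ht : t.count true = t.length :=
      ih (fun k hk => by simpa [List.getD] using h (k+1) (by simp; omega))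
    simp [h0, ht]

lemma pvMarkL_length (ks : List Nat) (v : List Bool) : (pvMarkL v ks).length = v.length := by
  induction ks generalizing v with
  | nil => rfl
  | cons a ks ih => rw [pvMarkL, ih]; simp

lemma pvMarkL_getD (ks : List Nat) (v : List Bool) (k : Nat) (h : ∀ x ∈ ks, x < v.length) :
    (pvMarkL v ks).getD k false = (v.getD k false || decide (k ∈ ks)) := by
  induction ks generalizing v with
  | nil => simp [pvMarkL]
  | cons a ks ih =>
    rw [pvMarkL, ih _ (fun x hx => by rw [List.length_set]; exact h x (List.mem_cons_of_mem _ hx))]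
    rw [pvGetD_set]
    by_cases hk : k = a
    · subst hk
      simp [h k List.mem_cons_self]
    · simp [hk]

lemma pvMarkL_count (ks : List Nat) (v : List Bool) (hnd : ks.Nodup)
    (h : ∀ x ∈ ks, x < v.length ∧ v.getD x false = false) :
    (pvMarkL v ks).count true = v.count true + ks.length := by
  induction ks generalizing v with
  | nil => simp [pvMarkL]
  | cons a ks ih =>
    have ha := h a List.mem_cons_self
    rw [pvMarkL, ih _ (List.nodup_cons.mp hnd).2 (fun x hx => by
      constructor
      · rw [List.length_set]; exact (h x (List.mem_cons_of_mem _ hx)).1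
      · rw [pvGetD_set, if_neg (by
          intro hc
          exact (List.nodup_cons.mp hnd).1 (hc.1 ▸ hx))]
        exact (h x (List.mem_cons_of_mem _ hx)).2)]
    rw [pvCount_set v a ha.1 ha.2]
    simp only [List.length_cons]
    omega

lemma pvMarkL_snoc (v : List Bool) (ks : List Nat) (k : Nat) :
    pvMarkL v (ks ++ [k]) = (pvMarkL v ks).set k true := by
  induction ks generalizing v with
  | nil => rfl
  | cons a ks ih => rw [List.cons_append, pvMarkL, pvMarkL, ih]

lemma pvCycN_succ (perm : List Int) (i u : Nat) :
    pvCycN perm i (u + 1) = pvCycN perm i u ++ [(pvPf perm)^[u] i] := by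
  unfold pvCycN
  rw [List.range_succ, List.map_append]
  rfl

lemma pvPf_lt (perm : List Int) (n : Nat) (hn : perm.length = n)
    (Hrange : ∀ k, k < n → 0 ≤ perm.getD k 0 ∧ perm.getD k 0 < (n : Int))
    (k : Nat) (hk : k < n) : pvPf perm k < n := by
  have := Hrange k hk
  unfold pvPf
  omega

lemma pvIter_lt (perm : List Int) (n : Nat) (hn : perm.length = n)
    (Hrange : ∀ k, k < n → 0 ≤ perm.getD k 0 ∧ perm.getD k 0 < (n : Int))
    (i : Nat) (hi : i < n) : ∀ a, (pvPf perm)^[a] i < n := by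
  intro a
  induction a with
  | zero => simpa using hi
  | succ a ih =>
    rw [Function.iterate_succ_apply']
    exact pvPf_lt perm n hn Hrange _ ih

lemma pvPf_inj (perm : List Int) (n : Nat) (hn : perm.length = n)
    (Hrange : ∀ k, k < n → 0 ≤ perm.getD k 0 ∧ perm.getD k 0 < (n : Int))
    (Hinj : ∀ a b, a < n → b < n → perm.getD a 0 = perm.getD b 0 → a = b)
    (a b : Nat) (ha : a < n) (hb : b < n) (h : pvPf perm a = pvPf perm b) : a = b := by
  apply Hinj a b ha hb
  have h1 := (Hrange a ha).1
  have h2 := (Hrange b hb).1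
  unfold pvPf at h
  omega

lemma pvIter_cancel (perm : List Int) (n : Nat) (hn : perm.length = n)
    (Hrange : ∀ k, k < n → 0 ≤ perm.getD k 0 ∧ perm.getD k 0 < (n : Int))
    (Hinj : ∀ a b, a < n → b < n → perm.getD a 0 = perm.getD b 0 → a = b)
    (i : Nat) (hi : i < n) :
    ∀ a c, (pvPf perm)^[a] i = (pvPf perm)^[a + c] i → i = (pvPf perm)^[c] i := by
  intro a
  induction a with
  | zero => intro c h; simpa using h
  | succ a ih =>
    intro c h
    rw [Function.iterate_succ_apply', show a + 1 + c = (a + c) + 1 by omega,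
      Function.iterate_succ_apply'] at h
    exact ih c (pvPf_inj perm n hn Hrange Hinj _ _
      (pvIter_lt perm n hn Hrange i hi a) (pvIter_lt perm n hn Hrange i hi (a + c)) h)

lemma pvRet_ex (perm : List Int) (n : Nat) (hn : perm.length = n)
    (Hrange : ∀ k, k < n → 0 ≤ perm.getD k 0 ∧ perm.getD k 0 < (n : Int))
    (Hinj : ∀ a b, a < n → b < n → perm.getD a 0 = perm.getD b 0 → a = b)
    (i : Nat) (hi : i < n) :
    ∃ m, 0 < m ∧ m ≤ n ∧ (pvPf perm)^[m] i = i := by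
  by_cases hrep : ∃ a b, a < b ∧ b ≤ n ∧ (pvPf perm)^[a] i = (pvPf perm)^[b] i
  · obtain ⟨a, b, hab, hbn, he⟩ := hrep
    refine ⟨b - a, by omega, by omega, ?_⟩
    have := pvIter_cancel perm n hn Hrange Hinj i hi a (b - a)
      (by rw [show a + (b - a) = b by omega]; exact he)
    exact this.symm
  · exfalso
    push Not at hrep
    have hinj : ∀ a b, a ≤ n → b ≤ n → (pvPf perm)^[a] i = (pvPf perm)^[b] i → a = b := by
      intro a b ha hb he
      by_contra hne
      rcases Nat.lt_or_ge a b with h | h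
      · exact absurd he (hrep a b h hb)
      · have : b < a := by omega
        exact absurd he.symm (hrep b a this ha)
    have hnd : ((List.range (n + 1)).map (fun a => (pvPf perm)^[a] i)).Nodup := by
      apply List.Nodup.map_on _ List.nodup_range
      intro a ha b hb he
      exact hinj a b (by simpa using Nat.lt_succ_iff.mp (List.mem_range.mp ha))
        (by simpa using Nat.lt_succ_iff.mp (List.mem_range.mp hb)) he
    have hsub : ((List.range (n + 1)).map (fun a => (pvPf perm)^[a] i)) ⊆ List.range n := by
      intro x hx
      obtain ⟨a, _, rfl⟩ := List.mem_map.mp hx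
      exact List.mem_range.mpr (pvIter_lt perm n hn Hrange i hi a)
    have h1 := List.toFinset_card_of_nodup hnd
    have h2 : ((List.range (n + 1)).map (fun a => (pvPf perm)^[a] i)).toFinset ⊆ (List.range n).toFinset := by
      intro x hx
      rw [List.mem_toFinset] at hx ⊢
      exact hsub hx
    have h3 := Finset.card_le_card h2
    have h4 := (List.range n).toFinset_card_le
    simp at h1
    simp [List.toFinset_range] at h3
    omega

lemma pvMem_cycN (perm : List Int) (i u x : Nat) :
    x ∈ pvCycN perm i u ↔ ∃ a, a < u ∧ (pvPf perm)^[a] i = x := by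
  unfold pvCycN
  constructor
  · intro hx
    obtain ⟨a, ha, he⟩ := List.mem_map.mp hx
    exact ⟨a, List.mem_range.mp ha, he⟩
  · rintro ⟨a, ha, he⟩
    exact List.mem_map.mpr ⟨a, List.mem_range.mpr ha, he⟩

lemma pvWalk_cyc (perm : List Int) (n : Nat) (i : Nat)
    (v : List Bool) (hv : v.length = n) (M : Nat)
    (Hlt : ∀ a, (pvPf perm)^[a] i < n)
    (Hdist : ∀ a b, a < b → b < M → (pvPf perm)^[a] i ≠ (pvPf perm)^[b] i)
    (HM3 : (pvPf perm)^[M] i = i) (HM1 : 0 < M)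
    (Hfresh : ∀ a, v.getD ((pvPf perm)^[a] i) false = false) :
    ∀ d u fuel, u + d = M → 1 ≤ u → M - u ≤ fuel →
      pvWalk perm fuel ((pvPf perm)^[u] i) (pvMarkL v (pvCycN perm i u))
        = pvMarkL v (pvCycN perm i M) := by
  have hcyclt : ∀ u, ∀ x ∈ pvCycN perm i u, x < v.length := by
    intro u x hx
    obtain ⟨a, -, rfl⟩ := (pvMem_cycN perm i u x).mp hx
    rw [hv]
    exact Hlt a
  intro d
  induction d with
  | zero =>
    intro u fuel hud hu1 hfu
    have huM : u = M := by omega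
    subst huM
    have hmark : (pvMarkL v (pvCycN perm i u)).getD ((pvPf perm)^[u] i) false = true := by
      rw [pvMarkL_getD _ _ _ (hcyclt u), HM3]
      have : i ∈ pvCycN perm i u := (pvMem_cycN perm i u i).mpr ⟨0, HM1, rfl⟩
      simp [this]
    cases fuel with
    | zero => rfl
    | succ f =>
      rw [pvWalk, if_neg (by rw [hmark]; simp)]
  | succ d ih =>
    intro u fuel hud hu1 hfu
    have huM : u < M := by omega
    have hnomem : (pvPf perm)^[u] i ∉ pvCycN perm i u := by
      intro hmem
      obtain ⟨a, ha, he⟩ := (pvMem_cycN perm i u _).mp hmem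
      exact Hdist a u ha huM he
    have hunmark : (pvMarkL v (pvCycN perm i u)).getD ((pvPf perm)^[u] i) false = false := by
      rw [pvMarkL_getD _ _ _ (hcyclt u), Hfresh u]
      simp [hnomem]
    cases fuel with
    | zero => omega
    | succ f =>
      rw [pvWalk, if_pos hunmark]
      have hpos : (perm.getD ((pvPf perm)^[u] i) 0).toNat = (pvPf perm)^[u + 1] i := by
        rw [Function.iterate_succ_apply']
        rfl
      rw [hpos, ← pvMarkL_snoc, ← pvCycN_succ]
      exact ih (u + 1) f (by omega) (by omega) (by omega)

lemma pvInner_cyc (perm : List Int) (n : Nat) (i : Nat) (hi : i < n)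
    (v : List Bool) (hv : v.length = n) (M : Nat)
    (Hrange : ∀ k, k < n → 0 ≤ perm.getD k 0 ∧ perm.getD k 0 < (n : Int))
    (Hlt : ∀ a, (pvPf perm)^[a] i < n)
    (Hdist : ∀ a b, a < b → b < M → (pvPf perm)^[a] i ≠ (pvPf perm)^[b] i)
    (HM3 : (pvPf perm)^[M] i = i) (HM1 : 0 < M)
    (Hfresh : ∀ a, v.getD ((pvPf perm)^[a] i) false = false) :
    ∀ d u fuel arr s, u + d = M → 1 ≤ u → M - u ≤ fuel → arr.length = n →
      (∀ k, k < n → arr.getD k 0 =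
        (if k = i then (((pvPf perm)^[u] i : Nat) : Int)
         else if k ∈ pvCycN perm i u ∨ v.getD k false = true then (k : Int) else perm.getD k 0)) →
      ∃ arr', pvInner arr i fuel s = (arr', s + ((M - u : Nat) : Int)) ∧ arr'.length = n ∧
        (∀ k, k < n → arr'.getD k 0 =
          (if k ∈ pvCycN perm i M ∨ v.getD k false = true then (k : Int) else perm.getD k 0)) := by
  intro d
  induction d with
  | zero =>
    intro u fuel arr s hud hu1 hfu harl hchar
    have huM : u = M := by omega
    subst huM
    have hstop : arr.getD i 0 = (i : Int) := by
      rw [hchar i hi, if_pos rfl, HM3]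
    have hres : pvInner arr i fuel s = (arr, s) := by
      cases fuel with
      | zero => rfl
      | succ f => rw [pvInner, if_neg (by rw [hstop]; simp)]
    refine ⟨arr, by rw [hres, show u - u = 0 by omega]; simp, harl, ?_⟩
    intro k hk
    rw [hchar k hk]
    by_cases hki : k = i
    · subst hki
      rw [if_pos rfl, if_pos (Or.inl ((pvMem_cycN perm k u k).mpr ⟨0, HM1, rfl⟩)), HM3]
    · rw [if_neg hki]
  | succ d ih =>
    intro u fuel arr s hud hu1 hfu harl hchar
    have huM : u < M := by omega
    have hnei : (pvPf perm)^[u] i ≠ i := by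
      intro he
      exact Hdist 0 u (by omega) huM (by simpa using he.symm)
    have hstep : arr.getD i 0 ≠ (i : Int) := by
      rw [hchar i hi, if_pos rfl]
      intro he
      exact hnei (by exact_mod_cast he)
    cases fuel with
    | zero => omega
    | succ f =>
      rw [pvInner, if_pos hstep]
      set j := (pvPf perm)^[u] i with hj
      have hjn : j < n := Hlt u
      have hgi : arr.getD i 0 = ((j : Nat) : Int) := by rw [hchar i hi, if_pos rfl]
      have hjtn : (arr.getD i 0).toNat = j := by rw [hgi]; omega
      have hjne : j ≠ i := hnei
      have hjnomem : j ∉ pvCycN perm i u := by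
        intro hmem
        obtain ⟨a, ha, he⟩ := (pvMem_cycN perm i u _).mp hmem
        exact Hdist a u ha huM he
      have hgj : arr.getD j 0 = perm.getD j 0 := by
        rw [hchar j hjn, if_neg hjne, if_neg (by
          rw [Hfresh u]
          simp [hjnomem])]
      have hnext : perm.getD j 0 = (((pvPf perm)^[u + 1] i : Nat) : Int) := by
        rw [Function.iterate_succ_apply', ← hj]
        have := (Hrange j hjn).1
        unfold pvPf
        omega
      set arr2 := (arr.set i (arr.getD ((arr.getD i 0).toNat) 0)).set ((arr.getD i 0).toNat) (arr.getD i 0) with harr2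
      have harl2 : arr2.length = n := by rw [harr2]; simpa using harl
      have hchar2 : ∀ k, k < n → arr2.getD k 0 =
          (if k = i then (((pvPf perm)^[u + 1] i : Nat) : Int)
           else if k ∈ pvCycN perm i (u + 1) ∨ v.getD k false = true then (k : Int) else perm.getD k 0) := by
        intro k hk
        rw [harr2, hjtn, pvGetD_set, pvGetD_set]
        by_cases hki : k = i
        · subst hki
          rw [if_neg (by intro hc; exact hjne hc.1.symm), if_pos ⟨rfl, by omega⟩, if_pos rfl,
            hgj, hnext]
        · by_cases hkj : k = j
          · subst hkj
            rw [if_pos ⟨rfl, by rw [List.length_set]; omega⟩, if_neg hki, hgi,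
              if_pos (Or.inl ((pvMem_cycN perm i (u + 1) j).mpr ⟨u, by omega, hj.symm⟩))]
          · rw [if_neg (by intro hc; exact hkj hc.1), if_neg (by intro hc; exact hki hc.1),
              hchar k hk, if_neg hki]
            have hmm : k ∈ pvCycN perm i (u + 1) ↔ k ∈ pvCycN perm i u := by
              rw [pvCycN_succ]
              simp only [List.mem_append, List.mem_singleton]
              constructor
              · rintro (h | h)
                · exact h
                · rw [← hj] at h
                  exact absurd h hkj
              · intro h
                exact Or.inl h
            rw [if_congr (or_congr hmm Iff.rfl) rfl rfl, if_neg hki]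
      obtain ⟨arr', he1, he2, he3⟩ := ih (u + 1) f arr2 (s + 1) (by omega) (by omega) (by omega) harl2 hchar2
      refine ⟨arr', ?_, he2, he3⟩
      rw [he1]
      refine Prod.ext rfl ?_
      show s + 1 + ((M - (u + 1) : Nat) : Int) = s + ((M - u : Nat) : Int)
      have : (M - u : Nat) = (M - (u + 1) : Nat) + 1 := by omega
      rw [this]
      push_cast
      ring

lemma pvInner_stop (arr : List Int) (i : Nat) (fuel : Nat) (s : Int)
    (h : arr.getD i 0 = (i : Int)) : pvInner arr i fuel s = (arr, s) := by
  cases fuel with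
  | zero => rfl
  | succ f => rw [pvInner, if_neg (by rw [h]; simp)]

lemma pvFresh (perm : List Int) (n : Nat) (i : Nat) (hi : i < n) (v : List Bool)
    (Hlt : ∀ a, (pvPf perm)^[a] i < n)
    (Hcl : ∀ k, k < n → v.getD (pvPf perm k) false = v.getD k false)
    (hvi : v.getD i false = false) :
    ∀ a, v.getD ((pvPf perm)^[a] i) false = false := by
  intro a
  induction a with
  | zero => simpa using hvi
  | succ a ih =>
    rw [Function.iterate_succ_apply', Hcl _ (Hlt a)]
    exact ih

lemma pvCycPfMem (perm : List Int) (n : Nat) (hn : perm.length = n)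
    (Hrange : ∀ k, k < n → 0 ≤ perm.getD k 0 ∧ perm.getD k 0 < (n : Int))
    (Hinj : ∀ a b, a < n → b < n → perm.getD a 0 = perm.getD b 0 → a = b)
    (i : Nat) (hi : i < n) (M : Nat) (HM1 : 0 < M) (HM3 : (pvPf perm)^[M] i = i)
    (k : Nat) (hk : k < n) :
    (k ∈ pvCycN perm i M ↔ pvPf perm k ∈ pvCycN perm i M) := by
  have Hlt := pvIter_lt perm n hn Hrange i hi
  constructor
  · intro hm
    obtain ⟨a, ha, he⟩ := (pvMem_cycN perm i M k).mp hm
    by_cases haM : a + 1 < M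
    · exact (pvMem_cycN perm i M _).mpr ⟨a + 1, haM, by rw [Function.iterate_succ_apply', he]⟩
    · have haM' : a + 1 = M := by omega
      refine (pvMem_cycN perm i M _).mpr ⟨0, HM1, ?_⟩
      have : (pvPf perm)^[a + 1] i = pvPf perm k := by rw [Function.iterate_succ_apply', he]
      rw [haM', HM3] at this
      simpa using this
  · intro hm
    obtain ⟨b, hb, he⟩ := (pvMem_cycN perm i M _).mp hm
    cases b with
    | zero =>
      refine (pvMem_cycN perm i M k).mpr ⟨M - 1, by omega, ?_⟩
      have h1 : (pvPf perm)^[(M - 1) + 1] i = i := by rw [show M - 1 + 1 = M by omega, HM3]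
      rw [Function.iterate_succ_apply'] at h1
      have h2 : pvPf perm ((pvPf perm)^[M - 1] i) = pvPf perm k := by
        rw [h1]
        simpa using he
      exact (pvPf_inj perm n hn Hrange Hinj _ _ (Hlt (M - 1)) hk h2).symm ▸ rfl
    | succ c =>
      refine (pvMem_cycN perm i M k).mpr ⟨c, by omega, ?_⟩
      rw [Function.iterate_succ_apply'] at he
      exact pvPf_inj perm n hn Hrange Hinj _ _ (Hlt c) hk he

-- the outer loops advance in lockstep: swaps + cycles = old swaps + cycles + newly visited
lemma pvOuterCycles (perm : List Int) (n : Nat) (hn : perm.length = n)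
    (Hrange : ∀ k, k < n → 0 ≤ perm.getD k 0 ∧ perm.getD k 0 < (n : Int))
    (Hinj : ∀ a b, a < n → b < n → perm.getD a 0 = perm.getD b 0 → a = b) :
    ∀ fuel i v arr (c s : Int), n - i ≤ fuel → v.length = n → arr.length = n →
      (∀ k, k < i → v.getD k false = true) →
      (∀ k, k < n → v.getD (pvPf perm k) false = v.getD k false) →
      (∀ k, k < n → arr.getD k 0 = (if v.getD k false = true then (k : Int) else perm.getD k 0)) →
      pvOuter arr i s + pvCyclesA perm i v c = s + c + ((n : Int) - (v.count true : Int)) := by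
  intro fuel
  induction fuel with
  | zero =>
    intro i v arr c s hfu hvl harl Hpre Hcl Hov
    have hni : ¬ i < n := by omega
    rw [pvOuter, dif_neg (by omega), pvCyclesA, dif_neg (by omega)]
    have : v.count true = v.length := pvCount_all v (fun k hk => Hpre k (by omega))
    rw [this, hvl]
    ring
  | succ fuel ih =>
    intro i v arr c s hfu hvl harl Hpre Hcl Hov
    by_cases hi : i < n
    · rw [pvOuter, dif_pos (by omega), pvCyclesA, dif_pos (by omega)]
      simp only []
      by_cases hvi : v.getD i false = true
      · -- already visited: both sides skip
        have hstop : arr.getD i 0 = (i : Int) := by rw [Hov i hi, if_pos hvi]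
        rw [pvInner_stop arr i arr.length s hstop]
        rw [if_pos (Or.inl hvi), if_neg (by rw [hvi]; simp)]
        exact ih (i + 1) v arr c s (by omega) hvl harl
          (fun k hk => by rcases Nat.lt_succ_iff_lt_or_eq.mp hk with h | h
                          · exact Hpre k h
                          · exact h ▸ hvi) Hcl Hov
      · have hvif : v.getD i false = false := by
          cases hq : v.getD i false
          · rfl
          · exact absurd hq hvi
        by_cases hfix : perm.getD i 0 = (i : Int)
        · -- fixed point
          have hstop : arr.getD i 0 = (i : Int) := by rw [Hov i hi, if_neg hvi, hfix]
          rw [pvInner_stop arr i arr.length s hstop]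
          rw [if_pos (Or.inr hfix), if_pos hvif]
          have hpfi : pvPf perm i = i := by unfold pvPf; rw [hfix]; omega
          have hrec := ih (i + 1) (v.set i true) arr (c + 1) s
            (by omega) (by simpa using hvl) harl
            (fun k hk => by
              rw [pvGetD_set]
              rcases Nat.lt_succ_iff_lt_or_eq.mp hk with h | h
              · split_ifs with hc
                · rfl
                · exact Hpre k h
              · subst h
                rw [if_pos ⟨rfl, by omega⟩])
            (fun k hk => by
              by_cases hki : k = i
              · rw [hki, hpfi]
              · have hpk : pvPf perm k ≠ i := by
                  intro hpk
                  apply hki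
                  apply pvPf_inj perm n hn Hrange Hinj k i hk hi
                  rw [hpk, hpfi]
                rw [pvGetD_set, pvGetD_set, if_neg (fun hc => hpk hc.1),
                  if_neg (fun hc => hki hc.1)]
                exact Hcl k hk)
            (fun k hk => by
              by_cases hki : k = i
              · have hcondT : (v.set i true).getD k false = true := by
                  rw [pvGetD_set, if_pos ⟨hki, by omega⟩]
                rw [if_pos hcondT, Hov k hk, hki, if_neg hvi]
                exact hfix
              · have hcondE : (v.set i true).getD k false = v.getD k false := by
                  rw [pvGetD_set, if_neg (fun hc => hki hc.1)]
                rw [if_congr (by rw [hcondE]) rfl rfl]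
                exact Hov k hk)
          rw [pvCount_set v i (by omega) hvif] at hrec
          show pvOuter arr (i + 1) s + pvCyclesA perm (i + 1) (v.set i true) (c + 1)
            = s + c + ((n : Int) - (v.count true : Int))
          rw [hrec]
          push_cast
          ring
        · -- a nontrivial cycle: walk it / swap it into place
          rw [if_neg (by
            intro hc
            rcases hc with h | h
            · exact hvi h
            · exact hfix h)]
          have hex : ∃ m, 0 < m ∧ (pvPf perm)^[m] i = i := by
            obtain ⟨m, h1, h2, h3⟩ := pvRet_ex perm n hn Hrange Hinj i hi
            exact ⟨m, h1, h3⟩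
          set M := Nat.find hex with hM
          obtain ⟨HM1, HM3⟩ := Nat.find_spec hex
          have HM2 : M ≤ n := by
            obtain ⟨m, h1, h2, h3⟩ := pvRet_ex perm n hn Hrange Hinj i hi
            have := Nat.find_min' hex ⟨h1, h3⟩
            omega
          have Hlt := pvIter_lt perm n hn Hrange i hi
          have Hdist : ∀ a b, a < b → b < M → (pvPf perm)^[a] i ≠ (pvPf perm)^[b] i := by
            intro a b hab hbM he
            have := pvIter_cancel perm n hn Hrange Hinj i hi a (b - a)
              (by rw [show a + (b - a) = b by omega]; exact he)
            exact Nat.find_min hex (show b - a < M by omega) ⟨by omega, this.symm⟩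
          have Hfresh := pvFresh perm n i hi v Hlt Hcl hvif
          have hcycnd : (pvCycN perm i M).Nodup := by
            apply List.Nodup.map_on _ List.nodup_range
            intro a ha b hb he
            by_contra hne
            rcases Nat.lt_or_ge a b with h | h
            · exact Hdist a b h (List.mem_range.mp hb) he
            · exact Hdist b a (by omega) (List.mem_range.mp ha) he.symm
          -- the walk of A
          obtain ⟨f0, hf0⟩ : ∃ f0, n = f0 + 1 := ⟨n - 1, by omega⟩
          have hwalk : pvWalk perm perm.length i v = pvMarkL v (pvCycN perm i M) := by
            rw [hn, hf0, pvWalk, if_pos hvif]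
            have h1 : v.set i true = pvMarkL v (pvCycN perm i 1) := rfl
            have h2 : (perm.getD i 0).toNat = (pvPf perm)^[1] i := by simp [pvPf]
            rw [h1, h2]
            exact pvWalk_cyc perm n i v hvl M Hlt Hdist HM3 HM1 Hfresh (M - 1) 1 f0
              (by omega) (by omega) (by omega)
          -- the inner swap loop of B
          obtain ⟨arr', he1, he2, he3⟩ := pvInner_cyc perm n i hi v hvl M Hrange Hlt Hdist HM3 HM1
            Hfresh (M - 1) 1 arr.length arr s (by omega) (by omega) (by omega) harl
            (by
              intro k hk
              by_cases hki : k = i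
              · subst hki
                rw [if_pos rfl, Hov k hk, if_neg hvi]
                have := (Hrange k hk).1
                simp only [Function.iterate_one]
                unfold pvPf
                omega
              · rw [if_neg hki]
                have : k ∈ pvCycN perm i 1 ↔ k = i := by
                  rw [pvMem_cycN]
                  constructor
                  · rintro ⟨a, ha, he⟩
                    interval_cases a
                    · simpa using he.symm
                  · intro h
                    exact ⟨0, by omega, by simpa using h.symm⟩
                rw [if_congr (or_congr this Iff.rfl) rfl rfl]
                rw [Hov k hk]
                by_cases hvk : v.getD k false = true
                · rw [if_pos hvk, if_pos (Or.inr hvk)]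
                · rw [if_neg hvk, if_neg (by
                    rintro (h | h)
                    · exact hki h
                    · exact hvk h)])
          rw [he1]
          set v' := pvMarkL v (pvCycN perm i M) with hv'
          have hv'get : ∀ k, (pvMarkL v (pvCycN perm i M)).getD k false
              = (v.getD k false || decide (k ∈ pvCycN perm i M)) := by
            intro k
            exact pvMarkL_getD _ _ _ (fun x hx => by
              obtain ⟨a, -, rfl⟩ := (pvMem_cycN perm i M x).mp hx
              rw [hvl]
              exact Hlt a)
          have hrec := ih (i + 1) v' arr' (c + 1) (s + ((M - 1 : Nat) : Int))
            (by omega) (by rw [hv', pvMarkL_length, hvl]) he2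
            (fun k hk => by
              rw [hv', hv'get]
              rcases Nat.lt_succ_iff_lt_or_eq.mp hk with h | h
              · rw [Hpre k h]
                simp
              · have hm : k ∈ pvCycN perm i M := by
                  rw [h]
                  exact (pvMem_cycN perm i M i).mpr ⟨0, HM1, rfl⟩
                simp [hm])
            (fun k hk => by
              rw [hv', hv'get, hv'get, Hcl k hk]
              have := pvCycPfMem perm n hn Hrange Hinj i hi M HM1 HM3 k hk
              by_cases hm : k ∈ pvCycN perm i M
              · simp [hm, this.mp hm]
              · have hm2 : pvPf perm k ∉ pvCycN perm i M := fun hc => hm (this.mpr hc)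
                simp [hm, hm2])
            (fun k hk => by
              rw [he3 k hk, hv', hv'get]
              by_cases hm : k ∈ pvCycN perm i M
              · simp [hm]
              · by_cases hvk : v.getD k false = true
                · simp [hm]
                · simp [hm])
          have hcount : v'.count true = v.count true + M := by
            rw [hv']
            have := pvMarkL_count (pvCycN perm i M) v hcycnd (fun x hx => by
              obtain ⟨a, -, rfl⟩ := (pvMem_cycN perm i M x).mp hx
              exact ⟨by rw [hvl]; exact Hlt a, Hfresh a⟩)
            rw [this]
            unfold pvCycN
            simp
          rw [hwalk]
          show pvOuter arr' (i + 1) (s + ((M - 1 : Nat) : Int)) + pvCyclesA perm (i + 1) v' (c + 1)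
            = s + c + ((n : Int) - (v.count true : Int))
          rw [hrec, hcount]
          have hM1' : ((M - 1 : Nat) : Int) = (M : Int) - 1 := by omega
          rw [hM1']
          push_cast
          ring
    · rw [pvOuter, dif_neg (by omega), pvCyclesA, dif_neg (by omega)]
      have : v.count true = v.length := pvCount_all v (fun k hk => Hpre k (by omega))
      rw [this, hvl]
      ring

-- swap simulation = n - cycles, for a permutation of [0, n)
lemma pvPhase2 (perm : List Int) (n : Nat) (hn : perm.length = n)
    (Hrange : ∀ k, k < n → 0 ≤ perm.getD k 0 ∧ perm.getD k 0 < (n : Int))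
    (Hinj : ∀ a b, a < n → b < n → perm.getD a 0 = perm.getD b 0 → a = b) :
    pvOuter perm 0 0 = (n : Int) - pvCyclesA perm 0 (List.replicate n false) 0 := by
  have hrep : ∀ k, (List.replicate n false).getD k false = false := by
    intro k
    simp [List.getD, List.getElem?_replicate]
    split_ifs <;> simp
  have h := pvOuterCycles perm n hn Hrange Hinj n 0 (List.replicate n false) perm 0 0
    (by omega) (by simp) hn (fun k hk => by omega)
    (fun k hk => by rw [hrep, hrep])
    (fun k hk => by rw [hrep]; simp)
  rw [List.count_replicate] at h
  simp at h
  omega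

-- ===== VERDICT (by name: the statement is the Claim_ definition above) =====
theorem count_min_swaps_py_spec : Claim_equal_count_min_swaps_py := by
  intro scr tgt _dom
  unfold Spec_count_min_swaps_py count_min_swaps_py count_min_swaps_py_alt
  simp only []
  by_cases hlen : scr.length ≠ tgt.length
  · rw [if_pos hlen, if_pos hlen]
  · rw [if_neg hlen, if_neg hlen]
    have hl : tgt.length = scr.length := (not_ne_iff.mp hlen).symm
    obtain ⟨heq, hprops⟩ := pvMatch_eq scr tgt hl
    rw [← heq]
    cases hA : pvPermA scr tgt 0 (List.replicate scr.length false) (List.replicate scr.length 0) with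
    | none => rfl
    | some perm =>
      obtain ⟨hplen, hrange, hinj⟩ := hprops perm hA
      have h2 := pvPhase2 perm scr.length hplen
        (fun k hk => ⟨(hrange k hk).1, (hrange k hk).2.1⟩) hinj
      exact h2.symm
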